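-- pv_equiv track=rewrite | github.com/kipawaa/Advent-Of-Code | 2023/day 9/sequences.py | sum_forward_extrapolations
-- ===== SOURCE A (Python) =====
-- def get_difference_sequence(sequence):
--     diffs = []
--     for i in range(len(sequence) - 1):
--         diffs.append(sequence[i+1] - sequence[i])
--     return diffs
--
-- def sum_forward_extrapolations(sequences):
--     sequences = [[int(i) for i in sequence.split()] for sequence in sequences]
--     total = 0
--     for sequence in sequences:
--         diffs = [sequence]
--         while sum(diffs[-1]) != 0:
--             diffs.append(get_difference_sequence(diffs[-1]))
--
--         diffs[-1].append(0)
--         for i in range(len(diffs)-2, -1, -1):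
--             diffs[i].append(diffs[i+1][-1] + diffs[i][-1])
--
--         total += diffs[0][-1]
--     return total
-- ===== SOURCE B (Python) =====
-- def sum_forward_extrapolations(sequences):
--     total = 0
--     for line in sequences:
--         seq = [int(t) for t in line.split()]
--         while sum(seq) != 0:
--             total += seq[-1]
--             seq = [b - a for a, b in zip(seq, seq[1:])]
--     return total
-- ===== Notes on version B (the rewrite author's own statement) =====
-- stated objective: simpler
-- what changed: Instead of storing the whole table of difference levels, appending a 0 and back-propagating new last elements upward, B keeps only the current level and adds its last element to the running total while the level's sum is nonzero, since the back-propagated head value equals the sum of the last elements of the non-terminating levels.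
import Mathlib
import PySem

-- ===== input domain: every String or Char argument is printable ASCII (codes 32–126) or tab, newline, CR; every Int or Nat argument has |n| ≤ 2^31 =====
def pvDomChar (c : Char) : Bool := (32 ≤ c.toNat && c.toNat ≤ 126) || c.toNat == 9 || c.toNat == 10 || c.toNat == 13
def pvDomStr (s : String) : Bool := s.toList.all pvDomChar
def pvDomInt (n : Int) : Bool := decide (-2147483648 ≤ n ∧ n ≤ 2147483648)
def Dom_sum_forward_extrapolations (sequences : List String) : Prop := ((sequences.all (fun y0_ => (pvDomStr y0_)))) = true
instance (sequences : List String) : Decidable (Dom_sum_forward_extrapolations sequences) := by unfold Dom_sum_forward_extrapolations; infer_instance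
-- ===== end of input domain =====

-- B replaces A's stored difference table + append-0 + backward propagation by a single
-- running total of the last elements of the non-terminating difference levels.


-- ===== PORT A =====

def get_difference_sequence (sequence : List Int) : List Int :=
  (PySem.List.pyRange 0 ((sequence.length : Int) - 1) 1).foldl
    (fun diffs i =>
      diffs ++ [PySem.List.pyGetD sequence (i + 1) 0 - PySem.List.pyGetD sequence i 0]) []

-- length fact cited by buildDiffs's decreasing_by
theorem gds_length (xs : List Int) :
    (get_difference_sequence xs).length = xs.length - 1 := by
  rw [get_difference_sequence, PySem.List.foldl_append_singleton_eq_map]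
  simp only [List.nil_append, List.length_map, PySem.List.length_pyRange_one]
  omega

-- the while loop building the list `diffs` of difference levels
def buildDiffs (cur : List Int) : List (List Int) :=
  if cur.sum ≠ 0 then cur :: buildDiffs (get_difference_sequence cur) else [cur]
termination_by cur.length
decreasing_by
  rename_i h
  have hne : cur ≠ [] := by rintro rfl; simp at h
  have := List.length_pos_of_ne_nil hne
  rw [gds_length]; omega

-- the body of A's per-sequence loop: build the table, append 0, back-propagate, read diffs[0][-1]
def extrapA (seq : List Int) : Int :=
  let ds0 := buildDiffs seq
  let ds1 := PySem.List.pySetD ds0 (-1) (PySem.List.pyGetD ds0 (-1) [] ++ [0])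
  let ds2 := (PySem.List.pyRange ((ds1.length : Int) - 2) (-1) (-1)).foldl
    (fun d i =>
      PySem.List.pySetD d i (PySem.List.pyGetD d i [] ++
        [PySem.List.pyGetD (PySem.List.pyGetD d (i + 1) []) (-1) 0 +
         PySem.List.pyGetD (PySem.List.pyGetD d i []) (-1) 0])) ds1
  PySem.List.pyGetD (PySem.List.pyGetD ds2 0 []) (-1) 0

def sum_forward_extrapolations (sequences : List String) : Int :=
  ((sequences.map (fun s => (PySem.Str.split₀ s).map (fun t => (PySem.Int.ofStr? t).getD 0))).foldl
    (fun total seq => total + extrapA seq) 0)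

-- ===== PORT B =====

def diffB (seq : List Int) : List Int :=
  (seq.zip (PySem.List.slice seq (some 1) none)).map (fun p => p.2 - p.1)

-- length fact cited by loopB's decreasing_by
theorem diffB_length (xs : List Int) : (diffB xs).length = xs.length - 1 := by
  simp [diffB, PySem.List.slice_from_one]

def loopB (seq : List Int) (total : Int) : Int :=
  if seq.sum ≠ 0 then loopB (diffB seq) (total + PySem.List.pyGetD seq (-1) 0) else total
termination_by seq.length
decreasing_by
  rename_i h
  have hne : seq ≠ [] := by rintro rfl; simp at h
  have := List.length_pos_of_ne_nil hne
  rw [diffB_length]; omega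

def sum_forward_extrapolations_alt (sequences : List String) : Int :=
  sequences.foldl
    (fun total line =>
      loopB ((PySem.Str.split₀ line).map (fun t => (PySem.Int.ofStr? t).getD 0)) total) 0

-- ===== PRECONDITION & SPEC =====
-- Pre_ excludes exactly the inputs where some whitespace-separated token is not a valid
-- Python int literal: there A raises ValueError.
def Pre_sum_forward_extrapolations (sequences : List String) : Prop :=
  ∀ s ∈ sequences, ∀ t ∈ PySem.Str.split₀ s, (PySem.Int.ofStr? t).isSome = true
instance (sequences : List String) : Decidable (Pre_sum_forward_extrapolations sequences) := by
  unfold Pre_sum_forward_extrapolations; infer_instance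

def pvWitness_sum_forward_extrapolations : List String := ["0 3 6 9", "10 13 16 21 30 45", ""]

def Spec_sum_forward_extrapolations (sequences : List String) (out : Int) : Prop :=
  out = sum_forward_extrapolations_alt sequences
instance (sequences : List String) (out : Int) :
    Decidable (Spec_sum_forward_extrapolations sequences out) := by
  unfold Spec_sum_forward_extrapolations; infer_instance

-- ===== CLAIM (what is proved, stated in full; the proofs are below) =====
def Claim_equal_sum_forward_extrapolations : Prop :=
  ∀ (sequences : List String), Dom_sum_forward_extrapolations sequences →
    Pre_sum_forward_extrapolations sequences →
    Spec_sum_forward_extrapolations sequences (sum_forward_extrapolations sequences)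

-- ===== LEMMAS AND PROOFS =====

-- A's hand-rolled difference loop equals B's zip-based comprehension
theorem diff_eq (xs : List Int) : get_difference_sequence xs = diffB xs := by
  rw [get_difference_sequence, PySem.List.foldl_append_singleton_eq_map, List.nil_append,
    diffB, PySem.List.slice_from_one]
  apply List.ext_getElem
  · simp [PySem.List.length_pyRange_one]
  · intro k h1 h2
    simp only [List.length_map, PySem.List.length_pyRange_one] at h1
    have hk1 : k + 1 < xs.length := by omega
    have hk : k < xs.length := by omega
    simp only [List.getElem_map, PySem.List.getElem_pyRange_one, List.getElem_zip,
      List.getElem_tail, zero_add]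
    rw [PySem.List.pyGetD_eq_getElem xs (i := (k:Int)+1) 0 (by positivity) (by omega),
      PySem.List.pyGetD_eq_getElem xs (i := (k:Int)) 0 (by positivity) (by omega)]
    have e1 : ((k:Int)+1).toNat = k+1 := by omega
    have e2 : ((k:Int)).toNat = k := by omega
    simp [e1, e2]

-- the value B accumulates per sequence: sum of last elements of all non-terminating levels
def lastsSum (xs : List Int) : Int :=
  ((buildDiffs xs).dropLast.map (fun l => PySem.List.pyGetD l (-1) 0)).sum

theorem buildDiffs_ne_nil (xs : List Int) : buildDiffs xs ≠ [] := by
  unfold buildDiffs; split <;> simp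

theorem loopB_spec (xs : List Int) (t : Int) : loopB xs t = t + lastsSum xs := by
  induction xs, t using loopB.induct with
  | case1 seq total h ih =>
      rw [loopB, if_pos h, ih]
      unfold lastsSum
      rw [show buildDiffs seq = seq :: buildDiffs (get_difference_sequence seq) from by
        rw [buildDiffs]; simp [h]]
      rw [diff_eq, List.dropLast_cons_of_ne_nil (by rw [← diff_eq]; exact buildDiffs_ne_nil _)]
      simp [add_assoc]
  | case2 seq total h =>
      rw [loopB, if_neg h]
      unfold lastsSum
      rw [show buildDiffs seq = [seq] from by rw [buildDiffs]; simp [h]]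
      simp

-- the step function of A's backward-propagation loop
def stepF (d : List (List Int)) (i : Int) : List (List Int) :=
  PySem.List.pySetD d i (PySem.List.pyGetD d i [] ++
    [PySem.List.pyGetD (PySem.List.pyGetD d (i + 1) []) (-1) 0 +
     PySem.List.pyGetD (PySem.List.pyGetD d i []) (-1) 0])

-- the backward loop re-indexed by the number of remaining indices m (processes m-1, …, 0)
def natFold : Nat → List (List Int) → List (List Int)
  | 0, d => d
  | m + 1, d => natFold m (stepF d (m : Int))

theorem bridge (j : Nat) (d : List (List Int)) :
    (PySem.List.pyRange (j : Int) (-1) (-1)).foldl stepF d = natFold (j + 1) d := by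
  induction j generalizing d with
  | zero =>
      rw [PySem.List.pyRange_neg_one_cons (by norm_num),
        PySem.List.pyRange_neg_one_eq_nil (by norm_num)]
      simp [natFold]
  | succ n ih =>
      rw [PySem.List.pyRange_neg_one_cons (by push_cast; omega)]
      simp only [List.foldl_cons]
      rw [show ((n + 1 : Nat) : Int) - 1 = (n : Int) by push_cast; ring, ih]
      rfl

def lastOf (l : List Int) : Int := PySem.List.pyGetD l (-1) 0

-- sum of the last elements of the levels from index k on
def S (es : List (List Int)) (k : Nat) : Int := ((es.drop k).map lastOf).sum

theorem S_succ (es : List (List Int)) (k : Nat) (hk : k < es.length) :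
    S es k = lastOf (PySem.List.pyGetD es (k : Int) []) + S es (k + 1) := by
  unfold S
  rw [List.drop_eq_getElem_cons hk, List.map_cons, List.sum_cons,
    PySem.List.pyGetD_natCast, List.getD_eq_getElem?_getD, List.getElem?_eq_getElem hk]
  rfl

theorem S_len (es : List (List Int)) : S es es.length = 0 := by
  unfold S; simp

-- loop invariant of the backward propagation: processed entries carry S as last element
theorem natFold_inv (es : List (List Int)) (m : Nat) :
    ∀ d : List (List Int), m ≤ es.length → d.length = es.length →
    (∀ k : Nat, k < m → PySem.List.pyGetD d (k : Int) [] = PySem.List.pyGetD es (k : Int) []) →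
    (∀ k : Nat, m ≤ k → k < es.length →
      lastOf (PySem.List.pyGetD d (k : Int) []) = S es k) →
    ∀ k : Nat, k < es.length →
      PySem.List.pyGetD (natFold m d) (k : Int) [] =
        if k < m then PySem.List.pyGetD es (k : Int) [] ++ [S es k]
        else PySem.List.pyGetD d (k : Int) [] := by
  induction m with
  | zero => intro d _ _ _ _ k _; simp [natFold]
  | succ m ih =>
      intro d hm hd hagree hlast k hk
      have hmlt : m < d.length := by omega
      -- the appended value at index m is S es m
      have hlast_succ : PySem.List.pyGetD (PySem.List.pyGetD d ((m : Int) + 1) []) (-1) 0 =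
          S es (m + 1) := by
        rw [show ((m : Int) + 1) = ((m + 1 : Nat) : Int) by push_cast; ring]
        by_cases h : m + 1 < es.length
        · exact hlast (m + 1) (by omega) h
        · have : m + 1 = es.length := by omega
          rw [PySem.List.pyGetD_natCast, List.getD_eq_getElem?_getD,
            List.getElem?_eq_none (by omega), this, S_len]
          rfl
      have hmm : PySem.List.pyGetD d (m : Int) [] = PySem.List.pyGetD es (m : Int) [] :=
        hagree m (by omega)
      have hnew : PySem.List.pyGetD d (m : Int) [] ++
          [PySem.List.pyGetD (PySem.List.pyGetD d ((m : Int) + 1) []) (-1) 0 +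
           PySem.List.pyGetD (PySem.List.pyGetD d (m : Int) []) (-1) 0] =
          PySem.List.pyGetD es (m : Int) [] ++ [S es m] := by
        rw [hlast_succ, hmm, S_succ es m (by omega)]
        rw [add_comm]
        rfl
      have hstep : ∀ j : Nat, j < es.length →
          PySem.List.pyGetD (stepF d (m : Int)) (j : Int) [] =
          if j = m then PySem.List.pyGetD es (m : Int) [] ++ [S es m]
          else PySem.List.pyGetD d (j : Int) [] := by
        intro j hj
        unfold stepF
        rw [PySem.List.pyGetD_pySetD_natCast d m j _ [] hmlt, hnew]
      rw [natFold]
      rw [ih (stepF d (m : Int)) (by omega)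
        (by unfold stepF; rw [PySem.List.length_pySetD]; exact hd)
        (by intro j hj
            rw [hstep j (by omega), if_neg (by omega : ¬ j = m)]
            exact hagree j (by omega))
        (by intro j hj1 hj2
            rw [hstep j hj2]
            split
            · next hje =>
                subst hje
                unfold lastOf
                rw [PySem.List.pyGetD_neg_one_append_singleton]
            · exact hlast j (by omega) hj2)
        k hk]
      rw [hstep k hk]
      by_cases h1 : k < m
      · simp [h1, Nat.lt_succ_of_lt h1]
      · by_cases h2 : k = m
        · subst h2; simp
        · simp [h1, h2, show ¬ k < m + 1 by omega]

theorem set_last {α : Type} : ∀ (xs : List α) (v : α), xs ≠ [] →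
    xs.set (xs.length - 1) v = xs.dropLast ++ [v]
  | [x], v, _ => rfl
  | x :: y :: t, v, _ => by
      have ih := set_last (y :: t) v (by simp)
      simp only [List.length_cons, Nat.add_sub_cancel] at ih ⊢
      simp only [List.set_cons_succ, List.dropLast_cons₂, List.cons_append]
      rw [ih]

theorem pySetD_neg_one {α : Type} (xs : List α) (v : α) (h : xs ≠ []) :
    PySem.List.pySetD xs (-1) v = xs.dropLast ++ [v] := by
  have hn : 1 ≤ xs.length := List.length_pos_of_ne_nil h
  unfold PySem.List.pySetD PySem.List.pySet? PySem.List.pyIdx?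
  rw [if_neg (by omega), if_pos (by omega)]
  simp only [Option.map_some, Option.getD_some]
  rw [show xs.length - (-(-1 : Int)).toNat = xs.length - 1 from by norm_num]
  exact set_last xs v h

theorem extrapA_spec (xs : List Int) : extrapA xs = lastsSum xs := by
  unfold extrapA
  dsimp only
  have hne := buildDiffs_ne_nil xs
  have hlen0 : 1 ≤ (buildDiffs xs).length := List.length_pos_of_ne_nil hne
  rw [PySem.List.pyGetD_neg_one (buildDiffs xs) [] hne, pySetD_neg_one (buildDiffs xs) _ hne]
  set ds0 := buildDiffs xs with hds0
  set es := ds0.dropLast ++ [ds0.getLast hne ++ [0]] with hes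
  have hdlen : ds0.dropLast.length = ds0.length - 1 := by simp
  have heslen : es.length = ds0.length := by
    rw [hes]; simp only [List.length_append, List.length_cons, List.length_nil, hdlen]; omega
  have hlastes : es.drop (ds0.length - 1) = [ds0.getLast hne ++ [0]] := by
    rw [hes, ← hdlen, List.drop_left]
  by_cases hL : ds0.length = 1
  · -- single level: the sum of the sequence is already 0, nothing propagates
    rw [heslen, hL, show ((1 : Nat) : Int) - 2 = -1 by norm_num,
      PySem.List.pyRange_neg_one_eq_nil (by norm_num), List.foldl_nil]
    have hdrop : ds0.dropLast = [] := by
      have : ds0.length - 1 = 0 := by omega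
      rw [← hdlen] at this
      exact List.eq_nil_of_length_eq_zero this
    rw [hes, hdrop, List.nil_append, PySem.List.pyGetD_zero_cons,
      PySem.List.pyGetD_neg_one_append_singleton]
    unfold lastsSum
    rw [← hds0, hdrop]; rfl
  · have h2 : 2 ≤ ds0.length := by omega
    rw [heslen, show ((ds0.length : Nat) : Int) - 2 = ((ds0.length - 2 : Nat) : Int) from by
      push_cast [Nat.cast_sub h2]; ring]
    change PySem.List.pyGetD (PySem.List.pyGetD
        (List.foldl stepF es (PySem.List.pyRange ((ds0.length - 2 : Nat) : Int) (-1) (-1)))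
        0 []) (-1) 0 = lastsSum xs
    rw [bridge (ds0.length - 2) es, show ds0.length - 2 + 1 = ds0.length - 1 from by omega]
    have hinv := natFold_inv es (ds0.length - 1) es (by omega) rfl
      (fun k _ => rfl)
      (by intro k hk1 hk2
          have hkeq : k = ds0.length - 1 := by omega
          subst hkeq
          have hget : PySem.List.pyGetD es ((ds0.length - 1 : Nat) : Int) [] =
              ds0.getLast hne ++ [0] := by
            rw [PySem.List.pyGetD_natCast, List.getD_eq_getElem?_getD, hes, ← hdlen,
              List.getElem?_append_right (le_refl _)]
            simp
          rw [hget]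
          unfold lastOf S
          rw [hlastes, PySem.List.pyGetD_neg_one_append_singleton]
          simp [PySem.List.pyGetD_neg_one_append_singleton, lastOf])
      0 (by omega)
    rw [show ((0 : Nat) : Int) = (0 : Int) from rfl] at hinv
    rw [hinv, if_pos (by omega), PySem.List.pyGetD_neg_one_append_singleton]
    -- S es 0 = lastsSum xs
    unfold S lastsSum
    rw [List.drop_zero, hes, List.map_append, List.sum_append, ← hds0]
    simp [lastOf, PySem.List.pyGetD_neg_one_append_singleton]
    rfl

theorem fold_eq (sequences : List String) :
    sum_forward_extrapolations sequences = sum_forward_extrapolations_alt sequences := by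
  unfold sum_forward_extrapolations sum_forward_extrapolations_alt
  rw [List.foldl_map]
  induction sequences using List.reverseRecOn with
  | nil => rfl
  | append_singleton xs x ih =>
      simp only [List.foldl_append, List.foldl_cons, List.foldl_nil, ih]
      rw [loopB_spec, extrapA_spec]

-- ===== VERDICT (by name: the statement is the Claim_ definition above) =====
theorem sum_forward_extrapolations_spec : Claim_equal_sum_forward_extrapolations := by
  intro sequences _ _
  exact fold_eq sequences
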